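-- pv_equiv track=rewrite | github.com/PEMessage/gdb-plug | gdb-plug.py | infer_bool_bygroup
-- ===== SOURCE A (Python) =====
-- def infer_bool_bygroup(value, groups):
--     if isinstance(value, bool):
--         return value
--     elif isinstance(value, int):
--         return bool(value)
--     elif isinstance(value, str):
--         value = value.split(',')
--         ret = False
--         for x in value:
--             if x.lower() in ["all", "true", "1"] + groups:
--                 ret = True
--             if x.lower() in ["none", "false", "0"] + ["-"+group for group in groups]:
--                 ret = False
--         return ret
--     else:
--         return False
-- ===== SOURCE B (Python) =====
-- def infer_bool_bygroup(value, groups):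
--     if isinstance(value, bool):
--         return value
--     if isinstance(value, int):
--         return bool(value)
--     if isinstance(value, str):
--         pos = {"all", "true", "1", *groups}
--         neg = {"none", "false", "0", *("-" + g for g in groups)}
--         for tok in reversed(value.split(',')):
--             t = tok.lower()
--             if t in neg:
--                 return False
--             if t in pos:
--                 return True
--         return False
--     return False
-- ===== Notes on version B (the rewrite author's own statement) =====
-- stated objective: alternative
-- what changed: B pre-builds positive/negative token sets once and scans the tokens in reverse with early return ('last match wins' by first hit from the end), instead of A's forward full scan that rebuilds the match lists per token and overwrites an accumulator.
import Mathlib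
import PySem

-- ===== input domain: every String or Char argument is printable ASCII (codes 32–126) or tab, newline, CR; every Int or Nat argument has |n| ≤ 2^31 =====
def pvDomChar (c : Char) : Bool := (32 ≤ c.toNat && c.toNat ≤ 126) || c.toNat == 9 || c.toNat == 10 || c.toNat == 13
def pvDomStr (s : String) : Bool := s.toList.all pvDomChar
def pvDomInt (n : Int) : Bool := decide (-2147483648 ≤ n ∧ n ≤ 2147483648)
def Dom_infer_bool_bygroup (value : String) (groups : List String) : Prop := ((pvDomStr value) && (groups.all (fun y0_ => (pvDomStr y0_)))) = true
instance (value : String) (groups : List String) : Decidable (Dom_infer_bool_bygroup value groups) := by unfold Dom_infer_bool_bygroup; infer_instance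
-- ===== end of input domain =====

-- B rebuilds the match lists once and scans tokens in reverse with early return; alternative decomposition, same result.


-- ===== PORT A =====
-- str branch of A: split on ',', forward scan with accumulator; membership lists rebuilt per token
def infer_bool_bygroup (value : String) (groups : List String) : Bool :=
  let parts := (PySem.Str.split? value ",").getD []  -- sep "," is nonempty, so split? is always some here
  parts.foldl (fun ret x =>
    let ret := if (["all", "true", "1"] ++ groups).contains (PySem.Str.lower x) then true else ret
    if (["none", "false", "0"] ++ groups.map (fun g => "-" ++ g)).contains (PySem.Str.lower x) then false else ret)
    false

-- ===== PORT B =====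
-- reverse scan with early return: first match from the end decides (negative checked first, as in Source B)
def inferRevScan (neg pos : List String) : List String → Bool
  | [] => false
  | tok :: rest =>
    let t := PySem.Str.lower tok
    if neg.contains t then false
    else if pos.contains t then true
    else inferRevScan neg pos rest

def infer_bool_bygroup_alt (value : String) (groups : List String) : Bool :=
  let pos := ["all", "true", "1"] ++ groups
  let neg := ["none", "false", "0"] ++ groups.map (fun g => "-" ++ g)
  inferRevScan neg pos ((PySem.Str.split? value ",").getD []).reverse

-- ===== PRECONDITION & SPEC =====
def Spec_infer_bool_bygroup (value : String) (groups : List String) (out : Bool) : Prop := out = infer_bool_bygroup_alt value groups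
instance (value : String) (groups : List String) (out : Bool) : Decidable (Spec_infer_bool_bygroup value groups out) := by unfold Spec_infer_bool_bygroup; infer_instance

-- ===== CLAIM (what is proved, stated in full; the proofs are below) =====
def Claim_equal_infer_bool_bygroup : Prop := ∀ (value : String) (groups : List String), Dom_infer_bool_bygroup value groups → Spec_infer_bool_bygroup value groups (infer_bool_bygroup value groups)

-- ===== LEMMAS AND PROOFS =====

-- A's one step, seen as a function of the accumulator
theorem step_eq (neg pos : List String) (r : Bool) (x : String) :
    (let r1 := if pos.contains (PySem.Str.lower x) then true else r;
     if neg.contains (PySem.Str.lower x) then false else r1)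
    = (if neg.contains (PySem.Str.lower x) then false
       else if pos.contains (PySem.Str.lower x) then true else r) := by
  by_cases h : neg.contains (PySem.Str.lower x) = true <;> simp [h]

-- forward foldl with accumulator = reverse scan, whenever some token matches; otherwise the accumulator
theorem foldl_eq_revScan (neg pos : List String) (l : List String) (acc : Bool) :
    l.foldl (fun ret x =>
      let r1 := if pos.contains (PySem.Str.lower x) then true else ret
      if neg.contains (PySem.Str.lower x) then false else r1) acc
    = (if l.any (fun x => neg.contains (PySem.Str.lower x) || pos.contains (PySem.Str.lower x))
       then inferRevScan neg pos l.reverse else acc) := by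
  induction l using List.reverseRecOn generalizing acc with
  | nil => simp
  | append_singleton l' x ih =>
    rw [List.foldl_append, List.foldl_cons, List.foldl_nil, step_eq]
    rw [List.reverse_append]
    simp only [List.reverse_cons, List.reverse_nil, List.nil_append, List.singleton_append,
      List.any_append, List.any_cons, List.any_nil, Bool.or_false, inferRevScan]
    by_cases hn : neg.contains (PySem.Str.lower x) = true
    · simp only [hn, if_true, Bool.true_or, Bool.or_true, ite_true]
    · simp only [Bool.not_eq_true] at hn
      by_cases hp : pos.contains (PySem.Str.lower x) = true
      · simp only [hn, hp, Bool.false_or, Bool.or_true, if_true, if_false, ite_true,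
          Bool.true_eq_false, Bool.false_eq_true]
      · simp only [Bool.not_eq_true] at hp
        simp only [hn, hp, Bool.false_or, Bool.or_false, if_false, ite_false,
          Bool.false_eq_true] at *
        exact ih acc

-- when no token matches, the reverse scan returns false
theorem revScan_false (neg pos : List String) (l : List String)
    (h : l.any (fun x => neg.contains (PySem.Str.lower x) || pos.contains (PySem.Str.lower x)) = false) :
    inferRevScan neg pos l = false := by
  induction l with
  | nil => rfl
  | cons x rest ih =>
    simp only [List.any_cons, Bool.or_eq_false_iff] at h
    obtain ⟨⟨hn, hp⟩, hrest⟩ := h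
    simp only [inferRevScan, hn, hp, Bool.false_eq_true, if_false, ite_false]
    exact ih hrest

-- ===== VERDICT (by name: the statement is the Claim_ definition above) =====
theorem infer_bool_bygroup_spec : Claim_equal_infer_bool_bygroup := by
  intro value groups _
  unfold Spec_infer_bool_bygroup infer_bool_bygroup infer_bool_bygroup_alt
  set neg := ["none", "false", "0"] ++ groups.map (fun g => "-" ++ g) with hneg
  set pos := ["all", "true", "1"] ++ groups with hpos
  set l := (PySem.Str.split? value ",").getD [] with hl
  rw [foldl_eq_revScan neg pos l false]
  by_cases h : (l.any fun x => neg.contains (PySem.Str.lower x) || pos.contains (PySem.Str.lower x)) = true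
  · rw [if_pos h]
  · rw [if_neg h]
    refine (revScan_false neg pos l.reverse ?_).symm
    rw [List.any_reverse]
    exact Bool.eq_false_iff.mpr h
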